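-- pv_equiv track=rewrite | github.com/elkinnarvaez/word_search | word_search.py | get_strips
-- ===== SOURCE A (Python) =====
-- def get_strips(board, n, m):
--     """
--         This method gets the longest possible word strips in the board in all directions (vertical, horizontal, digonal).
--
--         Input: A n x m word search board
--         Output: A map cotaining the longest possible word strips in all directions with its respective starting positions (vertical, horizontal and diagonal)
--     """
--     strips = {'h': [], 'v': [], 'd': []}
--     # Horizonal strips
--     for i in range(n):
--         strips['h'].append((''.join(board[i]), (i, 0)))
--     # Vertical strips
--     for j in range(m):
--         strips['v'].append((''.join([row[j] for row in board]), (0, j)))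
--     # Diagonal strips
--     for i in range(n):
--         strip = ""
--         i_prime, j_prime = i, 0
--         for _ in range(min(n - i, m)):
--             strip += board[i_prime][j_prime]
--             i_prime += 1
--             j_prime += 1
--         strips['d'].append((strip, (i, 0)))
--     for j in range(1, m):
--         strip = ""
--         i_prime, j_prime = 0, j
--         for _ in range(min(m - j, n)):
--             strip += board[i_prime][j_prime]
--             i_prime += 1
--             j_prime += 1
--         strips['d'].append((strip, (0, j)))
--     return strips
-- ===== SOURCE B (Python) =====
-- def get_strips(board, n, m):
--     """Horizontal strips are row joins and vertical strips are column joins;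
--     diagonal strips come from one pass over the grid's n x m cells that buckets
--     each cell by its diagonal index i - j, instead of walking every diagonal
--     with its own cursor."""
--     db = {}
--     for i in range(n):
--         row = board[i]
--         for j in range(m):
--             db.setdefault(i - j, []).append(row[j])
--     return {
--         'h': [(''.join(board[i]), (i, 0)) for i in range(n)],
--         'v': [(''.join(row[j] for row in board), (0, j)) for j in range(m)],
--         'd': [(''.join(db.get(k, [])), (k, 0)) for k in range(n)]
--            + [(''.join(db.get(-j, [])), (0, j)) for j in range(1, m)],
--     }
-- ===== Notes on version B (the rewrite author's own statement) =====
-- stated objective: alternative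
-- what changed: A's two families of diagonal cursor walks (one fresh i_prime/j_prime walk with string accumulation per diagonal) are replaced by one row-major pass over the grid's n x m cells that fills a dictionary keyed by diagonal index i-j, from which the 'd' strip list is read off; horizontal and vertical strips stay direct joins; Pre_ excludes exactly the inputs on which A raises IndexError (n beyond the row count, or a row shorter than m with m >= 1).
import Mathlib
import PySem

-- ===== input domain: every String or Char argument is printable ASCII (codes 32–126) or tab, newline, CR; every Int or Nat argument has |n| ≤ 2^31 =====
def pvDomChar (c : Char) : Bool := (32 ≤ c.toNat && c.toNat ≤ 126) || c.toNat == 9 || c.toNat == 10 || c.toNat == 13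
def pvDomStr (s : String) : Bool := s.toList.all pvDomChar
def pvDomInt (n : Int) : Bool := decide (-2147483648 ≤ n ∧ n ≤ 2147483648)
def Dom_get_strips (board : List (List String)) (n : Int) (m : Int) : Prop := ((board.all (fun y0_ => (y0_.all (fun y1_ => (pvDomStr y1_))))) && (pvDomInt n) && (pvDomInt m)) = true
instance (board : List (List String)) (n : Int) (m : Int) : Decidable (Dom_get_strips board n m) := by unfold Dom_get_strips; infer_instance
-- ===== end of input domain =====

-- B replaces A's per-diagonal cursor walks by ONE row-major pass over the grid's cells that
-- buckets each cell by its diagonal index i-j (objective: alternative decomposition).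

-- ===== PORT A =====
def get_strips (board : List (List String)) (n : Int) (m : Int) : List (String × List (String × (Int × Int))) :=
  let h := (PySem.List.pyRange 0 n 1).foldl (fun acc i =>
      acc ++ [(PySem.Str.join "" (PySem.List.pyGetD board i []), (i, (0 : Int)))]) []
  let v := (PySem.List.pyRange 0 m 1).foldl (fun acc j =>
      acc ++ [(PySem.Str.join "" (board.map (fun row => PySem.List.pyGetD row j "")), ((0 : Int), j))]) []
  let d1 := (PySem.List.pyRange 0 n 1).foldl (fun acc i =>
      let st := (PySem.List.pyRange 0 (min (n - i) m) 1).foldl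
        (fun (s : String × Int × Int) _ =>
          (s.1 ++ PySem.List.pyGetD (PySem.List.pyGetD board s.2.1 []) s.2.2 "", (s.2.1 + 1, s.2.2 + 1)))
        ("", (i, 0))
      acc ++ [(st.1, (i, (0 : Int)))]) []
  let d := (PySem.List.pyRange 1 m 1).foldl (fun acc j =>
      let st := (PySem.List.pyRange 0 (min (m - j) n) 1).foldl
        (fun (s : String × Int × Int) _ =>
          (s.1 ++ PySem.List.pyGetD (PySem.List.pyGetD board s.2.1 []) s.2.2 "", (s.2.1 + 1, s.2.2 + 1)))
        ("", (0, j))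
      acc ++ [(st.1, ((0 : Int), j))]) d1
  [("h", h), ("v", v), ("d", d)]

-- ===== PORT B =====
def get_strips_alt (board : List (List String)) (n : Int) (m : Int) : List (String × List (String × (Int × Int))) :=
  let db := (PySem.List.pyRange 0 n 1).foldl (fun d i =>
      let row := PySem.List.pyGetD board i []
      (PySem.List.pyRange 0 m 1).foldl (fun d2 j =>
        d2.modify (i - j) [] (· ++ [PySem.List.pyGetD row j ""])) d)
    (PySem.Dict.empty : PySem.Dict Int (List String))
  [("h", (PySem.List.pyRange 0 n 1).map (fun i => (PySem.Str.join "" (PySem.List.pyGetD board i []), (i, (0 : Int))))),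
   ("v", (PySem.List.pyRange 0 m 1).map (fun j => (PySem.Str.join "" (board.map (fun row => PySem.List.pyGetD row j "")), ((0 : Int), j)))),
   ("d", (PySem.List.pyRange 0 n 1).map (fun k => (PySem.Str.join "" (db.getD k []), (k, (0 : Int))))
      ++ (PySem.List.pyRange 1 m 1).map (fun j => (PySem.Str.join "" (db.getD (-j) []), ((0 : Int), j))))]

-- ===== PRECONDITION & SPEC =====
-- Pre_ excludes exactly the inputs on which A raises IndexError: n beyond the number of
-- rows (the 'h' and diagonal loops index board[i] for i < n), or some row shorter than m
-- with m ≥ 1 (the 'v' loop indexes row[j] of every row for j < m); B raises there too.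
def Pre_get_strips (board : List (List String)) (n : Int) (m : Int) : Prop :=
  n ≤ (board.length : Int) ∧ ∀ row ∈ board, m ≤ (row.length : Int)
instance (board : List (List String)) (n : Int) (m : Int) : Decidable (Pre_get_strips board n m) := by unfold Pre_get_strips; infer_instance
def pvWitness_get_strips : List (List String) × Int × Int := ([["a", "b"], ["c", "d"]], 2, 2)
def Spec_get_strips (board : List (List String)) (n : Int) (m : Int) (out : List (String × List (String × (Int × Int)))) : Prop := out = get_strips_alt board n m
instance (board : List (List String)) (n : Int) (m : Int) (out : List (String × List (String × (Int × Int)))) : Decidable (Spec_get_strips board n m out) := by unfold Spec_get_strips; infer_instance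

-- ===== CLAIM (what is proved, stated in full; the proofs are below) =====
def Claim_equal_get_strips : Prop := ∀ (board : List (List String)) (n : Int) (m : Int), Dom_get_strips board n m → Pre_get_strips board n m → Spec_get_strips board n m (get_strips board n m)

-- ===== LEMMAS AND PROOFS =====

-- the cells B's row-major pass visits, as (row, column, cell) triples
def pvRCells (board : List (List String)) (is : List Int) (m : Int) : List (Int × Int × String) :=
  is.flatMap (fun i => (PySem.List.pyRange 0 m 1).map
    (fun j => (i, j, PySem.List.pyGetD (PySem.List.pyGetD board i []) j "")))

theorem strJoin_nil : PySem.Str.join "" [] = "" := by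
  rw [← String.toList_inj]; simp [PySem.Str.toList_join, PySem.Chars.join_nil]

theorem strJoin_cons (a : String) (rest : List String) :
    PySem.Str.join "" (a :: rest) = a ++ PySem.Str.join "" rest := by
  rw [← String.toList_inj]
  simp only [PySem.Str.toList_join, String.toList_append, List.map_cons]
  cases rest with
  | nil => simp [PySem.Chars.join_singleton, PySem.Chars.join_nil]
  | cons b t => simp [PySem.Chars.join_cons_cons]

-- a flatMap of optional singletons is a filtered map
theorem flatMap_ite_singleton {α β : Type} (js : List α) (c : α → Prop) [DecidablePred c] (g : α → β) :
    js.flatMap (fun x => if c x then [g x] else []) = (js.filter (fun x => decide (c x))).map g := by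
  induction js with
  | nil => rfl
  | cons x t ih =>
    rw [List.flatMap_cons, List.filter_cons, ih]
    by_cases h : c x
    · simp [h]
    · simp [h]

-- a window filter of a contiguous range is the clipped range
theorem filter_range_window_aux (lo hi : Int) :
    ∀ (L : Nat) (a b : Int), (b - a).toNat = L →
      (PySem.List.pyRange a b 1).filter (fun j => decide (lo ≤ j ∧ j < hi))
        = PySem.List.pyRange (max a lo) (min b hi) 1 := by
  intro L
  induction L with
  | zero =>
    intro a b hL
    rw [PySem.List.pyRange_one_eq_nil (by omega), List.filter_nil,
      PySem.List.pyRange_one_eq_nil (by omega)]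
  | succ L ihL =>
    intro a b hL
    rw [PySem.List.pyRange_one_cons (by omega), List.filter_cons, ihL (a + 1) b (by omega)]
    by_cases h : lo ≤ a ∧ a < hi
    · rw [if_pos (by simpa using h)]
      rw [show max (a + 1) lo = a + 1 by omega, show max a lo = a by omega]
      rw [PySem.List.pyRange_one_cons (a := a) (b := min b hi) (by omega)]
    · rw [if_neg (by simpa using h)]
      by_cases h2 : lo ≤ a
      · have hhi : hi ≤ a := by omega
        rw [PySem.List.pyRange_one_eq_nil (by omega), PySem.List.pyRange_one_eq_nil (by omega)]
      · rw [show max (a + 1) lo = max a lo by omega]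

theorem filter_range_window (a b lo hi : Int) :
    (PySem.List.pyRange a b 1).filter (fun j => decide (lo ≤ j ∧ j < hi))
      = PySem.List.pyRange (max a lo) (min b hi) 1 :=
  filter_range_window_aux lo hi (b - a).toNat a b rfl

-- a range filtered at one value keeps exactly that value
theorem pyRange_filter_eq (m c : Int) :
    (PySem.List.pyRange 0 m 1).filter (fun j => j == c) = if 0 ≤ c ∧ c < m then [c] else [] := by
  rw [List.filter_congr (q := fun j => decide (c ≤ j ∧ j < c + 1))
    (fun j _ => by
      apply Bool.eq_iff_iff.mpr
      simp only [beq_iff_eq, decide_eq_true_eq]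
      omega)]
  rw [filter_range_window 0 m c (c + 1)]
  by_cases h : 0 ≤ c ∧ c < m
  · rw [if_pos h, show max (0 : Int) c = c by omega,
      PySem.List.pyRange_one_cons (by omega), PySem.List.pyRange_one_eq_nil (by omega)]
  · rw [if_neg h, PySem.List.pyRange_one_eq_nil (by omega)]

-- diagonal bucket: the pass's cells on diagonal k, one per admitting row, rows in order
theorem rcellsD (board : List (List String)) (is : List Int) (m k : Int) :
    ((pvRCells board is m).filter (fun p => p.1 - p.2.1 == k)).map (fun p => p.2.2)
      = (is.filter (fun i => decide (k ≤ i ∧ i < k + m))).map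
          (fun i => PySem.List.pyGetD (PySem.List.pyGetD board i []) (i - k) "") := by
  rw [pvRCells, List.filter_flatMap, List.map_flatMap,
    ← flatMap_ite_singleton is (fun i => k ≤ i ∧ i < k + m)
      (fun i => PySem.List.pyGetD (PySem.List.pyGetD board i []) (i - k) "")]
  apply List.flatMap_congr
  intro i _
  rw [List.filter_map, List.map_map]
  have hp : ((fun (p : Int × Int × String) => p.1 - p.2.1 == k)
        ∘ (fun j : Int => (i, j, PySem.List.pyGetD (PySem.List.pyGetD board i []) j "")))
      = fun j : Int => j == i - k := by
    funext j
    apply Bool.eq_iff_iff.mpr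
    simp only [Function.comp_apply, beq_iff_eq]
    omega
  rw [hp, pyRange_filter_eq m (i - k)]
  by_cases hc : k ≤ i ∧ i < k + m
  · rw [if_pos ⟨by omega, by omega⟩, if_pos hc]
    rfl
  · rw [if_neg (by omega), if_neg hc]
    rfl

-- A's inner diagonal loop builds the concatenation of the walked cells
theorem diag_fold (board : List (List String)) (l : List Int) (str : String) (ip jp : Int) :
    (l.foldl (fun (s : String × Int × Int) _ =>
        (s.1 ++ PySem.List.pyGetD (PySem.List.pyGetD board s.2.1 []) s.2.2 "", (s.2.1 + 1, s.2.2 + 1)))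
      (str, (ip, jp))).1
      = str ++ PySem.Str.join "" ((List.range l.length).map
          (fun t : Nat => PySem.List.pyGetD (PySem.List.pyGetD board (ip + (t : Int)) []) (jp + (t : Int)) "")) := by
  induction l generalizing str ip jp with
  | nil => simp [strJoin_nil]
  | cons x t ih =>
    simp only [List.foldl_cons, List.length_cons, List.range_succ_eq_map, List.map_cons,
      List.map_map]
    rw [ih, strJoin_cons]
    simp only [Nat.cast_zero, add_zero, String.append_assoc]
    congr 3
    apply List.map_congr_left
    intro t' _
    simp only [Function.comp_apply, Nat.cast_succ]
    ring_nf

-- a grouping fold read back at one key yields that key's cells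
theorem bucket_getD (cells : List (Int × Int × String)) (key : Int × Int × String → Int) (i : Int) :
    (cells.foldl (fun d p => d.modify (key p) [] (· ++ [p.2.2])) (PySem.Dict.empty : PySem.Dict Int (List String))).getD i []
      = (cells.filter (fun p => key p == i)).map (fun p => p.2.2) := by
  have h := PySem.Dict.getD_foldl_modify_append (cells.map (fun p => (key p, p.2.2)))
    (PySem.Dict.empty : PySem.Dict Int (List String)) i
  rw [List.foldl_map] at h
  simp only [List.filter_map, List.map_map, PySem.Dict.getD_empty, List.nil_append] at h
  exact h

-- B's nested per-row/per-column fold is the same fold over the flattened cell list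
theorem alt_fold_eq (board : List (List String)) (n m : Int)
    (e : PySem.Dict Int (List String)) :
    (PySem.List.pyRange 0 n 1).foldl (fun d i =>
        (PySem.List.pyRange 0 m 1).foldl (fun d2 j =>
          d2.modify (i - j) [] (· ++ [PySem.List.pyGetD (PySem.List.pyGetD board i []) j ""])) d) e
    = (pvRCells board (PySem.List.pyRange 0 n 1) m).foldl
        (fun d p => d.modify (p.1 - p.2.1) [] (· ++ [p.2.2])) e := by
  rw [pvRCells, List.foldl_flatMap]
  simp only [List.foldl_map]

-- ===== VERDICT (by name: the statement is the Claim_ definition above) =====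
set_option maxHeartbeats 1000000 in
theorem get_strips_spec : Claim_equal_get_strips := by
  intro board n m _hdom hpre
  obtain ⟨hn, _hrows⟩ := hpre
  unfold Spec_get_strips get_strips get_strips_alt
  simp only [alt_fold_eq, PySem.List.foldl_append_singleton_eq_map, List.nil_append,
    diag_fold, bucket_getD, String.empty_append, PySem.List.length_pyRange_one]
  simp only [List.cons.injEq, Prod.mk.injEq, true_and, and_true]
  congr 1
  · -- first diagonal family: starts (k, 0) for k in range(n)
    apply List.map_congr_left
    intro k hk
    rw [PySem.List.mem_pyRange_one] at hk
    rw [rcellsD board _ m k, filter_range_window 0 n k (k + m),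
      show max (0 : Int) k = k by omega,
      PySem.List.pyRange_one k (min n (k + m)), List.map_map,
      show (min n (k + m) - k).toNat = (min (n - k) m - 0).toNat by omega]
    congr 2
    apply List.map_congr_left
    intro t ht
    rw [List.mem_range] at ht
    simp only [Function.comp_apply]
    rw [show k + (t : Int) - k = 0 + (t : Int) by ring]
  · -- second diagonal family: starts (0, j0) for j0 in range(1, m)
    apply List.map_congr_left
    intro j0 hj0
    rw [PySem.List.mem_pyRange_one] at hj0
    rw [rcellsD board _ m (-j0), filter_range_window 0 n (-j0) (-j0 + m),
      show max (0 : Int) (-j0) = 0 by omega,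
      show min n (-j0 + m) = min (m - j0) n by omega,
      PySem.List.pyRange_one 0 (min (m - j0) n), List.map_map]
    congr 2
    apply List.map_congr_left
    intro t ht
    rw [List.mem_range] at ht
    simp only [Function.comp_apply]
    rw [show (0 : Int) + (t : Int) - -j0 = j0 + (t : Int) by ring]
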